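-- pv_equiv track=rewrite | github.com/Sensors-in-Paradise/UnicornML | src/utils/threshold_relabeling.py | relabel_feed_forward
-- ===== SOURCE A (Python) =====
-- def relabel_feed_forward(filtered_predictions, original_predictions):
--     relabeled_y_test_pred =  []
--     for _ in range(len(filtered_predictions)):
--         relabeled_y_test_pred.append([])
--
--     for idx, pred in enumerate(filtered_predictions):
--         if len(pred) == 0:
--
--             # if prediction at index 0 is empty, take the original prediction
--             if idx == 0:
--                 relabeled_y_test_pred[idx] = original_predictions[idx]
--             else:
--                 relabeled_y_test_pred[idx] = relabeled_y_test_pred[idx-1]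
--         else:
--             relabeled_y_test_pred[idx] = filtered_predictions[idx]
--     return relabeled_y_test_pred
-- ===== SOURCE B (Python) =====
-- def relabel_feed_forward(filtered_predictions, original_predictions):
--     n = len(filtered_predictions)
--     if n == 0:
--         return []
--     # indices of the non-empty predictions
--     marks = [i for i, p in enumerate(filtered_predictions) if p]
--     if not marks or marks[0] > 0:
--         prev_val = original_predictions[0]
--     else:
--         prev_val = filtered_predictions[0]
--     out = []
--     prev_end = 0
--     for i in marks:
--         out += [prev_val] * (i - prev_end)
--         prev_val = filtered_predictions[i]
--         prev_end = i
--     out += [prev_val] * (n - prev_end)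
--     return out
-- ===== Notes on version B (the rewrite author's own statement) =====
-- stated objective: alternative
-- what changed: Instead of a per-element forward-fill loop that patches a preallocated list and reads back relabeled[idx-1], B first collects the indices of the non-empty predictions and then builds the output in blocks, repeating each carried prediction over the whole gap up to the next mark with list multiplication.
import Mathlib
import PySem

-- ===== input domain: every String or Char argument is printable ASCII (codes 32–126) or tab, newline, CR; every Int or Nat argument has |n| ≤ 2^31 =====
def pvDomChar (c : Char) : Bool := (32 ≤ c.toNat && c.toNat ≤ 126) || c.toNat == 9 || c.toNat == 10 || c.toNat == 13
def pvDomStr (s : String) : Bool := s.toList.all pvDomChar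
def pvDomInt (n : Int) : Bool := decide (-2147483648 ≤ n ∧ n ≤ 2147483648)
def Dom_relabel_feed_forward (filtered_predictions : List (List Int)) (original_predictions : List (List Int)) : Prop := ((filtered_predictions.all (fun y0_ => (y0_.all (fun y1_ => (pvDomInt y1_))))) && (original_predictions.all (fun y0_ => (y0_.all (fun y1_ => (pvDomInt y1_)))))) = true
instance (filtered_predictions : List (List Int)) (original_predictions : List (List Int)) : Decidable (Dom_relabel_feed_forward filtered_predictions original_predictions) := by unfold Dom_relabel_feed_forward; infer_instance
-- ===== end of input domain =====

-- B replaces A's per-element forward-fill loop (preallocate, patch by index, read back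
-- relabeled[idx-1]) by a block construction: collect the indices of the non-empty
-- predictions, then emit each carried value over the whole gap to the next such index
-- with list repetition; objective: alternative.

-- ===== PORT A =====
-- loop body of A's second for-loop, named for the proofs; pyGetD is exact here because
-- under Pre_ every index A uses is in range
def relabelStepA (filtered_predictions : List (List Int)) (original_predictions : List (List Int))
    (rel : List (List Int)) (ip : Int × List Int) : List (List Int) :=
  if ip.2.length == 0 then
    if ip.1 == 0 then
      PySem.List.pySetD rel ip.1 (PySem.List.pyGetD original_predictions ip.1 [])
    else
      PySem.List.pySetD rel ip.1 (PySem.List.pyGetD rel (ip.1 - 1) [])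
  else
    PySem.List.pySetD rel ip.1 (PySem.List.pyGetD filtered_predictions ip.1 [])

def relabel_feed_forward (filtered_predictions : List (List Int)) (original_predictions : List (List Int)) : List (List Int) :=
  -- first loop: append [] once per element
  let relabeled := (PySem.List.pyRange 0 filtered_predictions.length 1).foldl
    (fun acc _ => acc ++ [([] : List Int)]) []
  -- second loop: for idx, pred in enumerate(filtered_predictions)
  (PySem.List.enumerate filtered_predictions 0).foldl
    (relabelStepA filtered_predictions original_predictions) relabeled

-- ===== PORT B =====
-- marks = [i for i, p in enumerate(l, k) if p]
def marksOf (l : List (List Int)) (k : Int) : List Int :=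
  ((PySem.List.enumerate l k).filter (fun ip => !ip.2.isEmpty)).map (·.1)

-- if not marks or marks[0] > 0: prev_val = original_predictions[0] else filtered_predictions[0]
def seedB (f o : List (List Int)) (marks : List Int) : List Int :=
  match marks with
  | [] => PySem.List.pyGetD o 0 []
  | i :: _ => if i > 0 then PySem.List.pyGetD o 0 [] else PySem.List.pyGetD f 0 []

-- loop body of B's for-loop over the marks: state = (out, prev_val, prev_end);
-- `[prev_val] * (i - prev_end)` is List.replicate (i - prev_end).toNat prev_val (exact:
-- Python's list multiplication by a non-positive count yields [])
def relabelStepB (f : List (List Int)) (st : List (List Int) × List Int × Int) (i : Int) :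
    List (List Int) × List Int × Int :=
  (st.1 ++ List.replicate (i - st.2.2).toNat st.2.1, PySem.List.pyGetD f i [], i)

def relabel_feed_forward_alt (filtered_predictions : List (List Int)) (original_predictions : List (List Int)) : List (List Int) :=
  if filtered_predictions.length == 0 then [] else
  let marks := marksOf filtered_predictions 0
  let prev_val := seedB filtered_predictions original_predictions marks
  let st := marks.foldl (relabelStepB filtered_predictions) ([], prev_val, 0)
  st.1 ++ List.replicate ((filtered_predictions.length : Int) - st.2.2).toNat st.2.1

-- ===== PRECONDITION & SPEC =====
-- A raises IndexError (original_predictions[0]) exactly when filtered_predictions starts with an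
-- empty prediction and original_predictions is empty; B raises there too. Pre_ excludes that.
def Pre_relabel_feed_forward (filtered_predictions : List (List Int)) (original_predictions : List (List Int)) : Prop :=
  filtered_predictions.head? = some ([] : List Int) → original_predictions ≠ []
instance (filtered_predictions : List (List Int)) (original_predictions : List (List Int)) : Decidable (Pre_relabel_feed_forward filtered_predictions original_predictions) := by unfold Pre_relabel_feed_forward; infer_instance

def pvWitness_relabel_feed_forward : List (List Int) × List (List Int) := ([[1], [], [2, 3], []], [[0]])

def Spec_relabel_feed_forward (filtered_predictions : List (List Int)) (original_predictions : List (List Int)) (out : List (List Int)) : Prop := out = relabel_feed_forward_alt filtered_predictions original_predictions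
instance (filtered_predictions : List (List Int)) (original_predictions : List (List Int)) (out : List (List Int)) : Decidable (Spec_relabel_feed_forward filtered_predictions original_predictions out) := by unfold Spec_relabel_feed_forward; infer_instance

-- ===== CLAIM (what is proved, stated in full; the proofs are below) =====
def Claim_equal_relabel_feed_forward : Prop := ∀ (filtered_predictions : List (List Int)) (original_predictions : List (List Int)), Dom_relabel_feed_forward filtered_predictions original_predictions → Pre_relabel_feed_forward filtered_predictions original_predictions → Spec_relabel_feed_forward filtered_predictions original_predictions (relabel_feed_forward filtered_predictions original_predictions)

-- ===== LEMMAS AND PROOFS =====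

-- the forward-filled sequence with initial carry c: the common reference value
def ffScan (c : List Int) : List (List Int) → List (List Int)
  | [] => []
  | p :: ps => let c' := if p ≠ [] then p else c; c' :: ffScan c' ps

-- ---- A-side: A's fold equals a seeded forward fill ----

theorem init_replicate (n : Nat) :
    (PySem.List.pyRange 0 n 1).foldl (fun acc _ => acc ++ [([] : List Int)]) []
      = List.replicate n ([] : List Int) := by
  have h : ∀ (l : List Int) (acc : List (List Int)),
      l.foldl (fun acc _ => acc ++ [([] : List Int)]) acc
        = acc ++ List.replicate l.length ([] : List Int) := by
    intro l
    induction l with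
    | nil => intro acc; simp
    | cons x xs ih =>
      intro acc
      rw [List.foldl_cons, ih]
      rw [List.append_assoc, List.singleton_append, ← List.replicate_succ]
      simp
  rw [h]
  simp [PySem.List.length_pyRange_one]

theorem take_set_succ {α : Type} (xs : List α) (j : Nat) (v : α) (hj : j < xs.length) :
    (xs.set j v).take (j + 1) = xs.take j ++ [v] := by
  rw [List.take_add_one]
  congr 1
  · exact List.take_set_of_le (le_refl j)
  · simp [List.getElem?_set_self (by simpa using hj)]

theorem foldA_inv (f o : List (List Int)) : ∀ (k : Nat) (i : Nat) (rel : List (List Int)) (c : List Int),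
    k = f.length - (i + 1) →
    rel.length = f.length → i < f.length → rel[i]? = some c →
    (PySem.List.enumerate (f.drop (i + 1)) ((i : Int) + 1)).foldl (relabelStepA f o) rel
      = rel.take (i + 1) ++ ffScan c (f.drop (i + 1)) := by
  intro k
  induction k with
  | zero =>
    intro i rel c hk hlen hi _
    have hdrop : f.drop (i + 1) = [] := List.drop_eq_nil_of_le (by omega)
    have : rel.length ≤ i + 1 := by
      have := (List.drop_eq_nil_iff).mp hdrop; omega
    simp [hdrop, ffScan, List.take_of_length_le this]
  | succ k ih =>
    intro i rel c hk hlen hi hc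
    have hi1 : i + 1 < f.length := by omega
    have hdrop : f.drop (i + 1) = f[i + 1] :: f.drop (i + 2) := by
      rw [List.drop_eq_getElem_cons hi1]
    rw [hdrop, PySem.List.enumerate_cons, List.foldl_cons]
    have hne : ¬ ((i : Int) + 1 == 0) = true := by simp; omega
    have hgetrel : PySem.List.pyGetD rel ((i : Int) + 1 - 1) [] = c := by
      have : (i : Int) + 1 - 1 = (i : Int) := by ring
      rw [this, PySem.List.pyGetD_natCast]
      simp [List.getD, hc]
    have hgetf : PySem.List.pyGetD f ((i : Int) + 1) [] = f[i + 1] := by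
      have : (i : Int) + 1 = ((i + 1 : Nat) : Int) := by push_cast; ring
      rw [this, PySem.List.pyGetD_natCast]
      simp [List.getD, List.getElem?_eq_getElem hi1]
    set c' := if f[i + 1] ≠ [] then f[i + 1] else c with hc'
    have hset : ∀ v : List Int, PySem.List.pySetD rel ((i : Int) + 1) v = rel.set (i + 1) v := by
      intro v
      rw [PySem.List.pySetD_of_nonneg rel v (show (0 : Int) ≤ (i : Int) + 1 by omega)]
      congr 1
    have hstep : relabelStepA f o rel ((i : Int) + 1, f[i + 1]) = rel.set (i + 1) c' := by
      simp only [relabelStepA, hne]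
      by_cases hp : f[i + 1] = []
      · simp only [hp, List.length_nil]
        rw [hgetrel]
        simp [hc', hp]
        exact hset c
      · have hlp : ¬ (f[i + 1].length == 0) = true := by simpa using hp
        simp only [hlp]
        rw [hgetf]
        simp [hc', hp]
        exact hset f[i + 1]
    rw [hstep]
    have hlen' : (rel.set (i + 1) c').length = f.length := by simpa using hlen
    have hc'' : (rel.set (i + 1) c')[i + 1]? = some c' :=
      List.getElem?_set_self (by omega)
    have hcast : ((i : Int) + 1 + 1) = (((i + 1 : Nat) : Int) + 1) := by push_cast; ring
    rw [hcast, ih (i + 1) (rel.set (i + 1) c') c' (by omega) hlen' hi1 hc'']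
    rw [take_set_succ rel (i + 1) c' (by omega)]
    simp only [ffScan, List.append_assoc, List.singleton_append]
    rw [← hc']

theorem A_eq_ffScan (p : List Int) (rest o : List (List Int)) :
    relabel_feed_forward (p :: rest) o
      = ffScan (PySem.List.pyGetD o 0 []) (p :: rest) := by
  set o0 : List Int := PySem.List.pyGetD o 0 [] with ho0
  set seed : List Int := if p ≠ [] then p else o0 with hseed
  have hgoal : ffScan o0 (p :: rest) = seed :: ffScan seed rest := by
    simp only [ffScan, hseed]
  rw [hgoal]
  unfold relabel_feed_forward
  rw [init_replicate, PySem.List.enumerate_cons, List.foldl_cons]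
  have hstep0 : relabelStepA (p :: rest) o (List.replicate (p :: rest).length []) (0, p)
      = seed :: List.replicate rest.length [] := by
    simp only [relabelStepA]
    by_cases hp : p = []
    · simp [hp, hseed, ho0, List.replicate_succ, PySem.List.pySetD_of_nonneg]
    · have hlp : ¬ (p.length == 0) = true := by simpa using hp
      simp [hlp, hp, hseed, List.replicate_succ, PySem.List.pySetD_of_nonneg,
        PySem.List.pyGetD_zero_cons]
  rw [hstep0]
  have hinv := foldA_inv (p :: rest) o rest.length 0
    (seed :: List.replicate rest.length []) seed (by simp) (by simp) (by simp) (by simp)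
  simpa using hinv

-- ---- B-side: the block fold over the marks equals the forward fill ----

theorem foldB_inv (f : List (List Int)) :
    ∀ (l : List (List Int)) (k e : Nat) (out : List (List Int)) (c : List Int),
    e ≤ k → f.drop k = l →
    (let st := (marksOf l (k : Int)).foldl (relabelStepB f) (out, c, (e : Int));
     st.1 ++ List.replicate (((k : Int) + l.length - st.2.2)).toNat st.2.1)
      = out ++ List.replicate (k - e) c ++ ffScan c l := by
  intro l
  induction l with
  | nil =>
    intro k e out c he _
    simp only [marksOf, PySem.List.enumerate_nil, List.filter_nil, List.map_nil,
      List.foldl_nil, List.length_nil, ffScan]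
    simp
  | cons p ps ih =>
    intro k e out c he hdrop
    have hdrop' : f.drop (k + 1) = ps := by
      have := congrArg List.tail hdrop
      simpa [List.tail_drop] using this
    have hget : f[k]? = some p := by
      rw [← List.head?_drop, hdrop]; rfl
    by_cases hp : p = []
    · -- empty prediction: no mark, the gap absorbs position k
      have hm : marksOf (p :: ps) (k : Int) = marksOf ps ((k : Int) + 1) := by
        simp [marksOf, PySem.List.enumerate_cons, hp]
      have hcast : ((k : Int) + 1) = (((k + 1 : Nat)) : Int) := by push_cast; ring
      have := ih (k + 1) e out c (by omega) hdrop'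
      simp only [hm, hcast] at *
      simp only [List.length_cons] at *
      have hlen : (((k + 1 : Nat) : Int) + (ps.length : Int)) = ((k : Int) + ((ps.length + 1 : Nat) : Int)) := by
        push_cast; ring
      rw [show ((k : Int) + ((ps.length : Nat) + 1 : Nat)) = (((k + 1 : Nat) : Int) + (ps.length : Int)) by push_cast; ring]
      rw [this]
      have hrep : List.replicate (k + 1 - e) c = List.replicate (k - e) c ++ [c] := by
        rw [show k + 1 - e = (k - e) + 1 by omega, List.replicate_succ']
      simp [hrep, ffScan, hp]
    · -- non-empty prediction: a mark at k
      have hm : marksOf (p :: ps) (k : Int) = (k : Int) :: marksOf ps ((k : Int) + 1) := by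
        simp [marksOf, PySem.List.enumerate_cons, hp]
      have hstep : relabelStepB f (out, c, (e : Int)) (k : Int)
          = (out ++ List.replicate (k - e) c, p, (k : Int)) := by
        simp only [relabelStepB]
        have h1 : ((k : Int) - (e : Int)).toNat = k - e := by omega
        have h2 : PySem.List.pyGetD f (k : Int) [] = p := by
          rw [PySem.List.pyGetD_natCast]; simp [List.getD, hget]
        rw [h1, h2]
      have hcast : ((k : Int) + 1) = (((k + 1 : Nat)) : Int) := by push_cast; ring
      have := ih (k + 1) k (out ++ List.replicate (k - e) c) p (by omega) hdrop'
      simp only [hm, List.foldl_cons, hstep, hcast] at *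
      rw [show ((k : Int) + ((p :: ps).length : Nat)) = (((k + 1 : Nat) : Int) + (ps.length : Int)) by simp; ring]
      rw [this]
      simp [ffScan, hp, List.replicate_succ]

theorem enumerate_fst_pos (l : List (List Int)) (s : Int) :
    ∀ q ∈ PySem.List.enumerate l s, s ≤ q.1 := by
  intro q hq
  rcases (PySem.List.mem_enumerate_iff _ _ _).mp hq with ⟨k, hk, rfl⟩
  simp

theorem foldB_top (f : List (List Int)) (pv : List Int) :
    ((marksOf f 0).foldl (relabelStepB f) ([], pv, 0)).1
      ++ List.replicate (((f.length : Int))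
          - ((marksOf f 0).foldl (relabelStepB f) ([], pv, 0)).2.2).toNat
        ((marksOf f 0).foldl (relabelStepB f) ([], pv, 0)).2.1
      = ffScan pv f := by
  have h := foldB_inv f f 0 0 [] pv (le_refl 0) (by simp)
  simpa using h

theorem B_eq_ffScan (p : List Int) (rest o : List (List Int)) :
    relabel_feed_forward_alt (p :: rest) o
      = ffScan (PySem.List.pyGetD o 0 []) (p :: rest) := by
  have hne : ¬ ((p :: rest).length == 0) = true := by simp
  unfold relabel_feed_forward_alt
  rw [if_neg hne, foldB_top (p :: rest) (seedB (p :: rest) o (marksOf (p :: rest) 0))]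
  by_cases hp : p = []
  · have hmhead : marksOf (p :: rest) 0 = marksOf rest 1 := by
      simp [marksOf, PySem.List.enumerate_cons, hp]
    have hseed : seedB (p :: rest) o (marksOf (p :: rest) 0) = PySem.List.pyGetD o 0 [] := by
      rw [hmhead]
      rcases hm : marksOf rest 1 with _ | ⟨i, ms⟩
      · simp [seedB]
      · have hi : (1 : Int) ≤ i := by
          have hmem : i ∈ marksOf rest 1 := by rw [hm]; exact List.mem_cons_self
          simp only [marksOf, List.mem_map] at hmem
          rcases hmem with ⟨q, hq, rfl⟩
          exact enumerate_fst_pos rest 1 q (List.mem_of_mem_filter hq)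
        simp [seedB, show (0 : Int) < i by omega]
    rw [hseed]
  · have hmhead : marksOf (p :: rest) 0 = 0 :: marksOf rest 1 := by
      simp [marksOf, PySem.List.enumerate_cons, hp]
    have hseed : seedB (p :: rest) o (marksOf (p :: rest) 0) = p := by
      rw [hmhead]; simp [seedB, PySem.List.pyGetD_zero_cons]
    rw [hseed]
    simp [ffScan, hp]

-- ===== VERDICT (by name: the statement is the Claim_ definition above) =====
theorem relabel_feed_forward_spec : Claim_equal_relabel_feed_forward := by
  intro f o _ _
  unfold Spec_relabel_feed_forward
  cases f with
  | nil => simp [relabel_feed_forward, relabel_feed_forward_alt, PySem.List.enumerate]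
  | cons p rest => rw [A_eq_ffScan, B_eq_ffScan]
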